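-- pv_equiv track=rewrite | github.com/paulklemstine/factor | lean/demo/New/LYMInequality/demos/sauer_shelah_demo.py | shatters
-- ===== SOURCE A (Python) =====
-- from itertools import combinations, product
--
-- def shatters(family, A):
--     """
--     Check if family F shatters set A.
--     F shatters A if for every subset B ⊆ A, there exists S ∈ F
--     such that A ∩ S = B.
--     """
--     A = frozenset(A)
--     # Generate all subsets of A
--     required = set()
--     for k in range(len(A) + 1):
--         for subset in combinations(A, k):
--             required.add(frozenset(subset))
--
--     # Check if each required intersection is achieved
--     achieved = set()
--     for S in family:
--         S = frozenset(S)
--         achieved.add(A & S)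
--
--     return required <= achieved
-- ===== SOURCE B (Python) =====
-- def shatters(family, A):
--     """
--     Check if family F shatters set A, without enumerating the subsets of A:
--     every achieved intersection A & S is a subset of A, so F shatters A
--     iff the number of DISTINCT intersections equals 2**len(A).
--     """
--     A = frozenset(A)
--     distinct = {A & frozenset(S) for S in family}
--     return len(distinct) == 2 ** len(A)
-- ===== Notes on version B (the rewrite author's own statement) =====
-- stated objective: faster
-- what changed: B skips the 2^|A| subset enumeration entirely: every intersection A&S is automatically a subset of A, so B just counts the distinct intersections and compares with 2^|A|.
import Mathlib
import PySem

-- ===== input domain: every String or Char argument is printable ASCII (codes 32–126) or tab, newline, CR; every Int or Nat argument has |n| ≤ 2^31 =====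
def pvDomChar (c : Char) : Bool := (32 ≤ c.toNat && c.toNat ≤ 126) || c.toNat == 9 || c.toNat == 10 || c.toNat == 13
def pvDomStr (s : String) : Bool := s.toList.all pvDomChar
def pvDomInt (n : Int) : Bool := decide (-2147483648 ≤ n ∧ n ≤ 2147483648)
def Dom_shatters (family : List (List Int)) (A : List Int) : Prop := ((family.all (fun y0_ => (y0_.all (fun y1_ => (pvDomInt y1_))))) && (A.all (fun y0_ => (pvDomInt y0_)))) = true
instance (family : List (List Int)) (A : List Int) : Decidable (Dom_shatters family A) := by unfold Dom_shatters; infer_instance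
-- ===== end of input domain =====

-- B replaces A's 2^|A| subset enumeration by counting the distinct intersections A∩S
-- and comparing with 2^|A| (objective: faster, asymptotic).


-- ===== PORT A =====
-- A frozenset of ints is represented canonically as the sublist of Aset (= set(A), first
-- occurrences) containing its elements: combinations(Aset, k) → Aset.sublistsLen k (each
-- k-combination is such a sublist), A & S → Set.inter Aset (set(S)) (a filter of Aset, hence
-- the same canonical form).  This is exact: equality of these lists ↔ equality of the
-- frozensets, and the result is a set-subset test, independent of Python's hash order.
def shatters (family : List (List Int)) (A : List Int) : Bool :=
  let Aset : PySem.Set Int := PySem.Set.ofList A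
  -- required = set(); for k in range(len(A)+1): for subset in combinations(A, k): required.add(frozenset(subset))
  let required : PySem.Set (List Int) :=
    (List.range (Aset.length + 1)).foldl
      (fun acc k => (Aset.sublistsLen k).foldl PySem.Set.add acc) PySem.Set.empty
  -- achieved = set(); for S in family: achieved.add(A & frozenset(S))
  let achieved : PySem.Set (List Int) :=
    family.foldl (fun acc S => PySem.Set.add acc (PySem.Set.inter Aset (PySem.Set.ofList S)))
      PySem.Set.empty
  PySem.Set.issubset required achieved

-- ===== PORT B =====
def shatters_alt (family : List (List Int)) (A : List Int) : Bool :=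
  let Aset : PySem.Set Int := PySem.Set.ofList A
  let distinct : PySem.Set (List Int) :=
    PySem.Set.ofList (family.map (fun S => PySem.Set.inter Aset (PySem.Set.ofList S)))
  distinct.length == 2 ^ Aset.length

-- ===== PRECONDITION & SPEC =====
def Spec_shatters (family : List (List Int)) (A : List Int) (out : Bool) : Prop := out = shatters_alt family A
instance (family : List (List Int)) (A : List Int) (out : Bool) : Decidable (Spec_shatters family A out) := by unfold Spec_shatters; infer_instance

-- ===== CLAIM (what is proved, stated in full; the proofs are below) =====
def Claim_equal_shatters : Prop := ∀ (family : List (List Int)) (A : List Int), Dom_shatters family A → Spec_shatters family A (shatters family A)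

-- ===== LEMMAS AND PROOFS =====

-- membership in A's doubly-nested set-building loop
theorem pv_mem_foldl_update {β : Type} (l : List β) (g : β → List (List Int))
    (s : PySem.Set (List Int)) (y : List Int) :
    y ∈ l.foldl (fun acc k => (g k).foldl PySem.Set.add acc) s ↔ y ∈ s ∨ ∃ k ∈ l, y ∈ g k := by
  induction l generalizing s with
  | nil => simp
  | cons k l ih =>
      simp only [List.foldl_cons, ih, List.mem_cons]
      rw [show (g k).foldl PySem.Set.add s = (g k).foldl (fun s b => s.add (id b)) s from rfl,
        PySem.Set.mem_foldl_add]
      constructor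
      · rintro ((h | h) | ⟨k', hk', hy⟩)
        · exact Or.inl h
        · rcases h with ⟨b, hb, rfl⟩
          exact Or.inr ⟨k, Or.inl rfl, hb⟩
        · exact Or.inr ⟨k', Or.inr hk', hy⟩
      · rintro (h | ⟨k', (hk' | hk'), hy⟩)
        · exact Or.inl (Or.inl h)
        · subst hk'; exact Or.inl (Or.inr ⟨y, hy, rfl⟩)
        · exact Or.inr ⟨k', hk', hy⟩

-- A's loop over family builds exactly B's set of distinct intersections
theorem pv_achieved_eq (family : List (List Int)) (Aset : PySem.Set Int) :
    family.foldl (fun acc S => PySem.Set.add acc (PySem.Set.inter Aset (PySem.Set.ofList S)))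
      PySem.Set.empty
    = PySem.Set.ofList (family.map (fun S => PySem.Set.inter Aset (PySem.Set.ofList S))) := by
  rw [PySem.Set.ofList_eq_foldl, List.foldl_map]
  rfl

-- members of A's `required` set are exactly the sublists of Aset
theorem pv_mem_required (Aset : PySem.Set Int) (y : List Int) :
    (y ∈ (List.range (Aset.length + 1)).foldl
        (fun acc k => (Aset.sublistsLen k).foldl PySem.Set.add acc) PySem.Set.empty)
      ↔ y.Sublist Aset := by
  rw [pv_mem_foldl_update]
  simp only [PySem.Set.empty, List.not_mem_nil, false_or, List.mem_range]
  constructor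
  · rintro ⟨k, _, hy⟩
    exact (List.mem_sublistsLen.1 hy).1
  · intro h
    exact ⟨y.length, Nat.lt_succ_of_le h.length_le, List.mem_sublistsLen.2 ⟨h, rfl⟩⟩

-- the core: "every sublist of Aset is an achieved intersection" ↔ "#distinct = 2^|Aset|"
theorem pv_core (family : List (List Int)) (Aset : PySem.Set Int) (hA : Aset.Nodup) :
    PySem.Set.issubset
        ((List.range (Aset.length + 1)).foldl
          (fun acc k => (Aset.sublistsLen k).foldl PySem.Set.add acc) PySem.Set.empty)
        (PySem.Set.ofList (family.map (fun S => PySem.Set.inter Aset (PySem.Set.ofList S))))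
      = ((PySem.Set.ofList (family.map (fun S => PySem.Set.inter Aset (PySem.Set.ofList S)))).length
          == 2 ^ Aset.length) := by
  set ach := PySem.Set.ofList (family.map (fun S => PySem.Set.inter Aset (PySem.Set.ofList S)))
    with hach
  have hach_nodup : ach.Nodup := PySem.Set.nodup_ofList _
  have hach_sub : ∀ y ∈ ach, y.Sublist Aset := by
    intro y hy
    rw [hach, PySem.Set.mem_ofList] at hy
    rcases List.mem_map.1 hy with ⟨S, _, rfl⟩
    exact List.filter_sublist
  have hP_nodup : Aset.sublists.Nodup := List.nodup_sublists.2 hA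
  rw [Bool.eq_iff_iff]
  simp only [PySem.Set.issubset_iff, beq_iff_eq, pv_mem_required]
  constructor
  · intro h
    have hfs : ach.toFinset = Aset.sublists.toFinset := by
      apply Finset.ext
      intro y
      simp only [List.mem_toFinset, List.mem_sublists]
      exact ⟨hach_sub y, fun hy => h y hy⟩
    calc ach.length = ach.toFinset.card := (List.toFinset_card_of_nodup hach_nodup).symm
      _ = Aset.sublists.toFinset.card := by rw [hfs]
      _ = Aset.sublists.length := List.toFinset_card_of_nodup hP_nodup
      _ = 2 ^ Aset.length := List.length_sublists Aset
  · intro hlen y hy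
    have hsub : ach.toFinset ⊆ Aset.sublists.toFinset := by
      intro x hx
      rw [List.mem_toFinset] at hx ⊢
      exact List.mem_sublists.2 (hach_sub x hx)
    have hcard : Aset.sublists.toFinset.card ≤ ach.toFinset.card := by
      rw [List.toFinset_card_of_nodup hach_nodup, List.toFinset_card_of_nodup hP_nodup,
        List.length_sublists, hlen]
    have heq := Finset.eq_of_subset_of_card_le hsub hcard
    have : y ∈ ach.toFinset := by
      rw [heq, List.mem_toFinset, List.mem_sublists]; exact hy
    exact List.mem_toFinset.1 this

-- ===== VERDICT (by name: the statement is the Claim_ definition above) =====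
theorem shatters_spec : Claim_equal_shatters := by
  intro family A _
  unfold Spec_shatters shatters shatters_alt
  simp only []
  rw [pv_achieved_eq]
  exact pv_core family (PySem.Set.ofList A) (PySem.Set.nodup_ofList A)
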